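-- pv_equiv track=rewrite | github.com/shrey199325/LeetCodeSolution | InterviewBit/DP/longest_balanced_substr.py | LBSlength
-- ===== SOURCE A (Python) =====
-- def LBSlength(A):
--     if len(A) <= 1:
--         return 0
--     open_close = {"}": "{", "]": "[", ")": "("}
--     stack = []
--     occur = []
--     dp = [0]*len(A)
--     for ind, i in enumerate(A):
--         if ind == 0:
--             if i not in open_close.keys():
--                 stack.append(i)
--                 occur.append(ind)
--         else:
--             if i not in open_close.keys():
--                 stack.append(i)
--                 occur.append(ind)
--             elif stack and open_close[i] == stack[-1]:
--                 stack.pop()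
--                 prev_occur = occur.pop()
--                 diff = ind - prev_occur + 1
--                 dp[ind] = dp[ind-diff] + (diff)
--             else:
--                 stack = []
--                 occur = []
--     return max(dp)
-- ===== SOURCE B (Python) =====
-- def LBSlength(A):
--     # Pure DP over positions: no stack, no occurrence list; dp grows by append.
--     if len(A) <= 1:
--         return 0
--     open_close = {"}": "{", "]": "[", ")": "("}
--     dp = []
--     for i, ch in enumerate(A):
--         cur = 0
--         m = open_close.get(ch)
--         if m is not None:
--             prev = dp[i - 1] if i > 0 else 0
--             j = i - prev - 1
--             if j >= 0 and A[j] == m: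
--                 cur = prev + 2 + (dp[j - 1] if j >= 1 else 0)
--         dp.append(cur)
--     return max(dp)
-- ===== Notes on version B (the rewrite author's own statement) =====
-- stated objective: simpler
-- what changed: Replaced the stack+occurrence-list bookkeeping with the classic stackless longest-valid-substring dynamic program: dp[i] for a closing bracket is derived purely from dp[i-1] and the character at the jump index j = i - dp[i-1] - 1, so the stack, the occur list and the reset logic disappear.
import Mathlib
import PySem

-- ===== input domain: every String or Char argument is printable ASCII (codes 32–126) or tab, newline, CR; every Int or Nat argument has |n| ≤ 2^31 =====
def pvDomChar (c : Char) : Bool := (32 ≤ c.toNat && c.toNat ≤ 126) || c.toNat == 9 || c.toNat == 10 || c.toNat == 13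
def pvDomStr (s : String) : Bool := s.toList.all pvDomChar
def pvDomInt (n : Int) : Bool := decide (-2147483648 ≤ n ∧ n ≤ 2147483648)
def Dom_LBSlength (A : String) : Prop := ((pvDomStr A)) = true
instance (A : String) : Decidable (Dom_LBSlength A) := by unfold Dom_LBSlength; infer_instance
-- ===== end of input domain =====

-- B replaces A's stack/occurrence-list bookkeeping by the classic stackless "longest valid
-- substring" dynamic program (simpler decomposition, same O(n) cost); return values proved equal.


-- ===== PORT A =====
-- open_close = {"}": "{", "]": "[", ")": "("}
def ocA : PySem.Dict Char Char := PySem.Dict.ofList [('}', '{'), (']', '['), (')', '(')]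

-- the body of A's `for ind, i in enumerate(A)` loop, state = (stack, occur, dp).
-- `.getD` defaults never fire on reachable states: `open_close[i]` is only read with i a key,
-- `occur[-1]`/`occur.pop()` only with occur nonempty, `dp[ind-diff]` is always in range (wrapping -1).
def stepA (st : List Char × List Int × List Int) (p : Int × Char) : List Char × List Int × List Int :=
  let ind := p.1
  let i := p.2
  let stack := st.1
  let occur := st.2.1
  let dp := st.2.2
  if ind == 0 then
    if ocA.contains i = false then (stack ++ [i], occur ++ [ind], dp) else (stack, occur, dp)
  else
    if ocA.contains i = false then (stack ++ [i], occur ++ [ind], dp)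
    else if stack ≠ [] ∧ (ocA.get? i).getD ' ' = stack.getLastD ' ' then
      let prev := occur.getLastD 0
      let diff := ind - prev + 1
      (stack.dropLast, occur.dropLast,
        dp.set ind.toNat ((PySem.List.pyGet? dp (ind - diff)).getD 0 + diff))
    else ([], [], dp)

def LBSlength (A : String) : Int :=
  let s := A.toList
  if s.length ≤ 1 then 0
  else
    let r := (PySem.List.enumerate s).foldl stepA ([], [], List.replicate s.length 0)
    (PySem.List.max? r.2.2 (fun x => x)).getD 0  -- max(dp); dp nonempty here

-- ===== PORT B =====
def ocB : PySem.Dict Char Char := PySem.Dict.ofList [('}', '{'), (']', '['), (')', '(')]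

-- the body of B's loop; state = dp (grown by append)
def stepB (s : List Char) (dp : List Int) (p : Int × Char) : List Int :=
  let i := p.1
  let ch := p.2
  let cur : Int :=
    match ocB.get? ch with
    | none => 0
    | some m =>
      let prev : Int := if 0 < i then (PySem.List.pyGet? dp (i - 1)).getD 0 else 0
      let j : Int := i - prev - 1
      if 0 ≤ j ∧ PySem.List.pyGet? s j = some m then
        prev + 2 + (if 1 ≤ j then (PySem.List.pyGet? dp (j - 1)).getD 0 else 0)
      else 0
  dp ++ [cur]

def LBSlength_alt (A : String) : Int :=
  let s := A.toList
  if s.length ≤ 1 then 0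
  else
    let dp := (PySem.List.enumerate s).foldl (stepB s) []
    (PySem.List.max? dp (fun x => x)).getD 0  -- max(dp); dp nonempty here

-- ===== PRECONDITION & SPEC =====
def Spec_LBSlength (A : String) (out : Int) : Prop := out = LBSlength_alt A
instance (A : String) (out : Int) : Decidable (Spec_LBSlength A out) := by unfold Spec_LBSlength; infer_instance

-- ===== CLAIM (what is proved, stated in full; the proofs are below) =====
def Claim_equal_LBSlength : Prop := ∀ (A : String), Dom_LBSlength A → Spec_LBSlength A (LBSlength A)

-- ===== LEMMAS AND PROOFS =====

-- `dp[k-1]`: the value of the last processed dp cell (0 at the start)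
def pvR (d : List Int) (k : Nat) : Int := if k = 0 then 0 else d.getD (k - 1) 0

-- chain invariant tying A's stack positions (top first) to B's dp values:
-- the valid run ending just before position k reaches down exactly to the next
-- unmatched position p (or to the floor b when the stack is empty)
def pvChain (s : List Char) (d : List Int) (b : Int) : List Nat → Nat → Prop
  | [], k => pvR d k = (k : Int) - 1 - b
  | p :: ps, k => pvR d k = (k : Int) - 1 - (p : Int) ∧ p < k ∧
      (ocA.get? (s.getD p ' ')).isSome = false ∧ pvChain s d b ps p

-- the floor: -1, or a closing char where A reset
def pvBlocked (s : List Char) (b : Int) (k : Nat) : Prop :=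
  b = -1 ∨ (0 ≤ b ∧ b < (k : Int) ∧ (ocA.get? (s.getD b.toNat ' ')).isSome = true)

def pvInv (s : List Char) (k : Nat) (stack : List Char) (occur : List Int)
    (dpA d : List Int) : Prop :=
  ∃ qs b,
    stack = (qs.map (fun p => s.getD p ' ')).reverse ∧
    occur = (qs.map (fun p : Nat => (p : Int))).reverse ∧
    d.length = k ∧
    dpA = d ++ List.replicate (s.length - k) 0 ∧
    pvBlocked s b k ∧ pvChain s d b qs k
lemma ocA_mk : ocA = PySem.Dict.mk [('}', '{'), (']', '['), (')', '(')] := by decide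

lemma ocB_eq_ocA : ocB = ocA := by decide

lemma ocA_spec (c : Char) : ocA.get? c =
    if c = '}' then some '{' else if c = ']' then some '[' else if c = ')' then some '(' else none := by
  rw [ocA_mk]
  simp only [PySem.Dict.get?_mk_cons, beq_iff_eq]
  split_ifs <;> subst_eqs <;> first | rfl | simp_all

lemma ocA_open_none {c m : Char} (h : ocA.get? c = some m) : ocA.get? m = none := by
  rw [ocA_spec] at h
  split_ifs at h <;> (injection h with h; subst h; rw [ocA_spec]; rfl)

lemma pvR_append (d e : List Int) (k : Nat) (hk : k ≤ d.length) : pvR (d ++ e) k = pvR d k := by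
  unfold pvR
  split_ifs with h
  · rfl
  · rw [List.getD_append _ _ _ _ (by omega)]

lemma pvR_snoc (d : List Int) (v : Int) (k : Nat) (h : d.length = k) : pvR (d ++ [v]) (k + 1) = v := by
  unfold pvR
  rw [if_neg (by omega)]
  simp [List.getD_eq_getElem?_getD, h]

lemma pyRead_eq (d : List Int) (p : Nat) (h1 : 1 ≤ p) :
    (PySem.List.pyGet? d ((p : Int) - 1)).getD 0 = pvR d p := by
  have h2 : ((p : Int) - 1) = ((p - 1 : Nat) : Int) := by omega
  rw [h2, PySem.List.pyGet?_natCast]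
  unfold pvR
  rw [if_neg (by omega)]
  simp [List.getD_eq_getElem?_getD]

lemma prev_eq (d : List Int) (k : Nat) :
    (if (0:Int) < ((k : Nat) : Int) then (PySem.List.pyGet? d (((k : Nat) : Int) - 1)).getD 0 else 0) = pvR d k := by
  cases k with
  | zero => rfl
  | succ t => rw [if_pos (by positivity), pyRead_eq d (t+1) (by omega)]

lemma zero_last (d : List Int) (m : Nat) (hm : 0 < m) :
    (d ++ List.replicate m (0:Int)).getLast? = some 0 := by
  cases m with
  | zero => omega
  | succ t => rw [List.replicate_succ', ← List.append_assoc, List.getLast?_concat]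

lemma rev_getLastD {α : Type} (x : α) (l : List α) (a : α) : ((x :: l).reverse).getLastD a = x := by
  rw [List.getLastD_eq_getLast?, List.reverse_cons, List.getLast?_concat]
  rfl

lemma rev_dropLast {α : Type} (x : α) (l : List α) : ((x :: l).reverse).dropLast = l.reverse := by
  rw [List.reverse_cons, List.dropLast_concat]

lemma set_mid (d : List Int) (m : Nat) (v : Int) (hm : 0 < m) :
    (d ++ List.replicate m (0:Int)).set d.length v = (d ++ [v]) ++ List.replicate (m - 1) 0 := by
  cases m with
  | zero => omega
  | succ t => simp [List.replicate_succ]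

lemma pyGet_getD (s : List Char) (p : Nat) (hp : p < s.length) :
    PySem.List.pyGet? s ((p : Nat) : Int) = some (s.getD p ' ') := by
  rw [PySem.List.pyGet?_natCast]
  simp [List.getD_eq_getElem?_getD, List.getElem?_eq_getElem hp]

lemma blocked_mono {s : List Char} {b : Int} {k k' : Nat} (h : pvBlocked s b k) (hk : k ≤ k') :
    pvBlocked s b k' := by
  rcases h with h | ⟨h1, h2, h3⟩
  · exact Or.inl h
  · exact Or.inr ⟨h1, by omega, h3⟩

lemma pvChain_append (s : List Char) (d e : List Int) (b : Int) :
    ∀ (qs : List Nat) (k : Nat), k ≤ d.length → pvChain s d b qs k → pvChain s (d ++ e) b qs k := by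
  intro qs
  induction qs with
  | nil => intro k hk h; unfold pvChain at *; rw [pvR_append _ _ _ hk]; exact h
  | cons p ps ih =>
    intro k hk h
    obtain ⟨h1, h2, h3, h4⟩ := h
    exact ⟨by rw [pvR_append _ _ _ hk]; exact h1, h2, h3, ih p (by omega) h4⟩

lemma dpA_grow (s : List Char) (d dpA : List Int) (k : Nat) (hk : k < s.length)
    (h : dpA = d ++ List.replicate (s.length - k) 0) :
    dpA = (d ++ [0]) ++ List.replicate (s.length - (k + 1)) 0 := by
  rw [h]
  have h2 : s.length - k = (s.length - (k + 1)) + 1 := by omega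
  rw [h2, List.replicate_succ]
  simp

lemma inv_reset (s : List Char) (k : Nat) (c : Char) (d dpA : List Int)
    (hk : k < s.length) (hc : s.getD k ' ' = c) (hclose : (ocA.get? c).isSome = true)
    (hlen : d.length = k) (hdpA : dpA = d ++ List.replicate (s.length - k) 0) :
    pvInv s (k + 1) [] [] dpA (d ++ [0]) := by
  refine ⟨[], (k : Int), by simp, by simp, by simp [hlen], dpA_grow s d dpA k hk hdpA,
    Or.inr ⟨by omega, by push_cast; omega, ?_⟩, ?_⟩
  · rw [Int.toNat_natCast, hc]; exact hclose
  · show pvR (d ++ [0]) (k + 1) = ((k + 1 : Nat) : Int) - 1 - (k : Int)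
    rw [pvR_snoc d 0 k hlen]; push_cast; ring
lemma pvStep (s : List Char) (k : Nat) (c : Char) (stack : List Char) (occur : List Int)
    (dpA d : List Int) (hk : k < s.length) (hc : s.getD k ' ' = c)
    (h : pvInv s k stack occur dpA d) :
    pvInv s (k + 1) (stepA (stack, occur, dpA) ((k : Int), c)).1
      (stepA (stack, occur, dpA) ((k : Int), c)).2.1
      (stepA (stack, occur, dpA) ((k : Int), c)).2.2
      (stepB s d ((k : Int), c)) := by
  obtain ⟨qs, b, hstack, hoccur, hlen, hdpA, hbl, hch⟩ := h
  cases hget : ocA.get? c with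
  | none =>
    have hcont : ocA.contains c = false := by
      rw [PySem.Dict.contains_eq_isSome_get?, hget]; rfl
    have hA : stepA (stack, occur, dpA) ((k : Int), c) = (stack ++ [c], occur ++ [(k : Int)], dpA) := by
      simp [stepA, hcont]
    have hB : stepB s d ((k : Int), c) = d ++ [0] := by
      simp [stepB, ocB_eq_ocA, hget]
    rw [hA, hB]
    refine ⟨k :: qs, b, ?_, ?_, by simp [hlen], dpA_grow s d dpA k hk hdpA,
      blocked_mono hbl (by omega), ?_, by omega, by rw [hc, hget]; rfl,
      pvChain_append s d [0] b qs k (le_of_eq hlen.symm) hch⟩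
    · simp [hstack, ← hc, List.getD_eq_getElem?_getD]
    · simp [hoccur]
    · show pvR (d ++ [0]) (k + 1) = ((k + 1 : Nat) : Int) - 1 - (k : Int)
      rw [pvR_snoc d 0 k hlen]; push_cast; ring
  | some m =>
    have hcont : ocA.contains c = true := by
      rw [PySem.Dict.contains_eq_isSome_get?, hget]; rfl
    have hmnone := ocA_open_none hget
    cases qs with
    | nil =>
      have hst : stack = [] := by simp [hstack]
      have hoc : occur = [] := by simp [hoccur]
      have hA : stepA (stack, occur, dpA) ((k : Int), c) = ([], [], dpA) := by
        subst hst hoc; simp [stepA, hcont]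
      have hRk : pvR d k = (k : Int) - 1 - b := hch
      have hB : stepB s d ((k : Int), c) = d ++ [0] := by
        simp only [stepB, ocB_eq_ocA, hget]
        rw [prev_eq d k, hRk]
        have hj : (k : Int) - ((k : Int) - 1 - b) - 1 = b := by ring
        rw [hj]
        rcases hbl with hb | ⟨hb0, hbk, hbc⟩
        · subst hb; rw [if_neg (by simp)]
        · have hbn : (b : Int) = ((b.toNat : Nat) : Int) := by omega
          have hblt : b.toNat < s.length := by omega
          rw [hbn, pyGet_getD s b.toNat hblt, if_neg]
          rintro ⟨-, he⟩
          injection he with he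
          rw [he] at hbc
          rw [hmnone] at hbc
          exact Bool.false_ne_true hbc
      rw [hA, hB]
      exact inv_reset s k c d dpA hk hc (by rw [hget]; rfl) hlen hdpA
    | cons p ps =>
      obtain ⟨hR, hpk, hpopen, hchp⟩ := hch
      have hk1 : 1 ≤ k := by omega
      have hk0 : ((k : Int) == 0) = false := by simp; omega
      have hlast : stack.getLastD ' ' = s.getD p ' ' := by
        rw [hstack, List.map_cons]; exact rev_getLastD _ _ _
      have hocclast : occur.getLastD 0 = (p : Int) := by
        rw [hoccur, List.map_cons]; exact rev_getLastD _ _ _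
      have hne : stack ≠ [] := by rw [hstack]; simp
      have hplt : p < s.length := by omega
      by_cases hm : m = s.getD p ' '
      · -- match: A pops and writes dp[k], B's jump test succeeds
        have hguard : stack ≠ [] ∧ (ocA.get? c).getD ' ' = stack.getLastD ' ' := by
          refine ⟨hne, ?_⟩; rw [hget, hlast]; exact hm
        have hidx : (k : Int) - ((k : Int) - (p : Int) + 1) = (p : Int) - 1 := by ring
        have hA : stepA (stack, occur, dpA) ((k : Int), c) =
            (stack.dropLast, occur.dropLast,
              dpA.set k ((PySem.List.pyGet? dpA ((p : Int) - 1)).getD 0 + ((k : Int) - (p : Int) + 1))) := by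
          simp only [stepA, hk0, Bool.false_eq_true, if_false, hcont]
          rw [if_neg (by simp), if_pos hguard, hocclast, hidx]
          simp
        have hval : (PySem.List.pyGet? dpA ((p : Int) - 1)).getD 0 = pvR d p := by
          cases p with
          | zero =>
            show (PySem.List.pyGet? dpA ((0:Int) - 1)).getD 0 = 0
            have : ((0:Int) - 1) = (-1 : Int) := by ring
            rw [this, PySem.List.pyGet?_neg_one, hdpA, zero_last d _ (by omega)]
            rfl
          | succ t =>
            rw [pyRead_eq dpA (t + 1) (by omega), hdpA, pvR_append d _ _ (by omega)]
        have hinner : (if (1 : Int) ≤ (p : Int) then (PySem.List.pyGet? d ((p : Int) - 1)).getD 0 else 0)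
            = pvR d p := by
          cases p with
          | zero => rw [if_neg (by omega)]; rfl
          | succ t => rw [if_pos (by push_cast; omega), pyRead_eq d (t + 1) (by omega)]
        have hB : stepB s d ((k : Int), c) = d ++ [((k : Int) - 1 - (p : Int)) + 2 + pvR d p] := by
          simp only [stepB, ocB_eq_ocA, hget]
          rw [prev_eq d k, hR]
          have hj : (k : Int) - ((k : Int) - 1 - (p : Int)) - 1 = (p : Int) := by ring
          rw [hj, pyGet_getD s p hplt,
            if_pos ⟨Int.natCast_nonneg p, by rw [hm]⟩, hinner]
        rw [hA, hB]
        have hv : (PySem.List.pyGet? dpA ((p : Int) - 1)).getD 0 + ((k : Int) - (p : Int) + 1)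
            = ((k : Int) - 1 - (p : Int)) + 2 + pvR d p := by rw [hval]; ring
        refine ⟨ps, b, ?_, ?_, by simp [hlen], ?_, blocked_mono hbl (by omega), ?_⟩
        · rw [hstack, List.map_cons]; exact rev_dropLast _ _
        · rw [hoccur, List.map_cons]; exact rev_dropLast _ _
        · rw [hv, hdpA, ← hlen, set_mid d _ _ (by omega)]
          congr 2
        · -- chain for ps at k+1
          cases ps with
          | nil =>
            have hbase : pvR d p = (p : Int) - 1 - b := hchp
            show pvR (d ++ [_]) (k + 1) = ((k + 1 : Nat) : Int) - 1 - b
            rw [pvR_snoc _ _ _ hlen, hbase]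
            push_cast; ring
          | cons p2 ps2 =>
            obtain ⟨g1, g2, g3, g4⟩ := hchp
            refine ⟨?_, by omega, g3, pvChain_append s d _ b ps2 p2 (by omega) g4⟩
            show pvR (d ++ [_]) (k + 1) = ((k + 1 : Nat) : Int) - 1 - (p2 : Int)
            rw [pvR_snoc _ _ _ hlen, g1]
            push_cast; ring
      · -- mismatch: A resets, B's jump test fails
        have hA : stepA (stack, occur, dpA) ((k : Int), c) = ([], [], dpA) := by
          simp only [stepA, hk0, Bool.false_eq_true, if_false, hcont]
          rw [if_neg (by simp), if_neg]
          rintro ⟨-, hg⟩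
          rw [hget, hlast] at hg
          exact hm hg
        have hB : stepB s d ((k : Int), c) = d ++ [0] := by
          simp only [stepB, ocB_eq_ocA, hget]
          rw [prev_eq d k, hR]
          have hj : (k : Int) - ((k : Int) - 1 - (p : Int)) - 1 = (p : Int) := by ring
          rw [hj, pyGet_getD s p hplt, if_neg]
          rintro ⟨-, he⟩
          injection he with he
          exact hm he.symm
        rw [hA, hB]
        exact inv_reset s k c d dpA hk hc (by rw [hget]; rfl) hlen hdpA
lemma pvFold (s : List Char) : ∀ (suf : List Char) (k : Nat) (stack : List Char)
    (occur : List Int) (dpA d : List Int), s.drop k = suf → pvInv s k stack occur dpA d →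
    pvInv s (k + suf.length)
      ((PySem.List.enumerate suf (k : Int)).foldl stepA (stack, occur, dpA)).1
      ((PySem.List.enumerate suf (k : Int)).foldl stepA (stack, occur, dpA)).2.1
      ((PySem.List.enumerate suf (k : Int)).foldl stepA (stack, occur, dpA)).2.2
      ((PySem.List.enumerate suf (k : Int)).foldl (stepB s) d) := by
  intro suf
  induction suf with
  | nil => intro k stack occur dpA d _ h; simpa [PySem.List.enumerate_nil] using h
  | cons c cs ih =>
    intro k stack occur dpA d hdrop h
    have hk : k < s.length := by
      have := congrArg List.length hdrop
      simp [List.length_drop] at this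
      omega
    have hck : s.getD k ' ' = c := by
      have h0 : s[k]? = (s.drop k)[0]? := by rw [List.getElem?_drop]; norm_num
      rw [hdrop] at h0
      simp [List.getD_eq_getElem?_getD, h0]
    have hdrop' : s.drop (k + 1) = cs := by
      have : s.drop (k + 1) = (s.drop k).drop 1 := by rw [List.drop_drop]
      rw [this, hdrop]
      rfl
    have hstep := pvStep s k c stack occur dpA d hk hck h
    have hih := ih (k + 1) (stepA (stack, occur, dpA) ((k : Int), c)).1
      (stepA (stack, occur, dpA) ((k : Int), c)).2.1
      (stepA (stack, occur, dpA) ((k : Int), c)).2.2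
      (stepB s d ((k : Int), c)) hdrop' hstep
    rw [PySem.List.enumerate_cons]
    simp only [List.foldl_cons]
    have harith : k + (c :: cs).length = (k + 1) + cs.length := by simp; omega
    rw [harith]
    have hcast : (k : Int) + 1 = ((k + 1 : Nat) : Int) := by push_cast; ring
    rw [hcast]
    simpa using hih

-- ===== VERDICT (by name: the statement is the Claim_ definition above) =====
theorem LBSlength_spec : Claim_equal_LBSlength := by
  unfold Claim_equal_LBSlength Spec_LBSlength
  intro A _
  unfold LBSlength LBSlength_alt
  by_cases h : A.toList.length ≤ 1
  · have h' : A.length ≤ 1 := by simpa using h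
    simp [h']
  · rw [if_neg h, if_neg h]
    have hinit : pvInv A.toList 0 [] [] (List.replicate A.toList.length 0) [] := by
      refine ⟨[], -1, rfl, rfl, rfl, by simp, Or.inl rfl, ?_⟩
      show pvR [] 0 = ((0 : Nat) : Int) - 1 - (-1)
      norm_num [pvR]
    have hfold := pvFold A.toList A.toList 0 [] [] (List.replicate A.toList.length 0) []
      (by rfl) hinit
    obtain ⟨qs, b, -, -, -, hdpA, -, -⟩ := hfold
    simp only [Nat.cast_zero, Nat.zero_add, Nat.sub_self, List.replicate_zero,
      List.append_nil] at hdpA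
    dsimp only
    rw [hdpA]
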